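-- pv_equiv track=rewrite | github.com/haixiashi/kanjireadingmap | tools/reencode_da.py | decode_b93
-- ===== SOURCE A (Python) =====
-- def char_to_digit(c):
--     """Convert printable ASCII char to digit 0-92, inverse of digit_to_char."""
--     d = ord(c) - 0x20
--     if d > 2:
--         d -= 1  # undo " skip
--     if d > 59:
--         d -= 1  # undo \ skip
--     return d
--
-- def decode_b93(s):
--     """Decode base-93 string to bit array. 13 chars -> 85 bits."""
--     P = 2 ** 32
--     bits = []
--     for i in range(0, len(s), 13):
--         l = m = h = 0
--         for j in range(13):
--             d = char_to_digit(s[i + j]) if i + j < len(s) else 0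
--             v = l * 93 + d; l = v % P; c = (v - l) // P
--             v = m * 93 + c; m = v % P; c = (v - m) // P
--             h = h * 93 + c
--         for j in range(84, -1, -1):
--             if j > 63:
--                 bits.append((h >> (j - 64)) & 1)
--             elif j > 31:
--                 bits.append((m >> (j - 32)) & 1)
--             else:
--                 bits.append((l >> j) & 1)
--     return bits
-- ===== SOURCE B (Python) =====
-- def char_to_digit(c):
--     d = ord(c) - 0x20
--     if d > 2:
--         d -= 1
--     if d > 59:
--         d -= 1
--     return d
--
-- def decode_b93(s):
--     """Decode base-93 string to bit array. 13 chars -> 85 bits.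
--     One native bignum per chunk (Horner) instead of three 32-bit words with
--     manual carries; bits extracted LSB-first and reversed."""
--     bits = []
--     for i in range(0, len(s), 13):
--         val = 0
--         for j in range(13):
--             d = char_to_digit(s[i + j]) if i + j < len(s) else 0
--             val = val * 93 + d
--         chunk = []
--         for _ in range(85):
--             chunk.append(val & 1)
--             val >>= 1
--         bits.extend(reversed(chunk))
--     return bits
-- ===== Notes on version B (the rewrite author's own statement) =====
-- stated objective: simpler
-- what changed: Replaces the three 32-bit words l/m/h with hand-rolled carry propagation and the tri-branch word-selecting bit emission by a single native Python integer built with Horner's rule, with bits extracted LSB-first by repeated shift-and-mask and reversed.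
import Mathlib
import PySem

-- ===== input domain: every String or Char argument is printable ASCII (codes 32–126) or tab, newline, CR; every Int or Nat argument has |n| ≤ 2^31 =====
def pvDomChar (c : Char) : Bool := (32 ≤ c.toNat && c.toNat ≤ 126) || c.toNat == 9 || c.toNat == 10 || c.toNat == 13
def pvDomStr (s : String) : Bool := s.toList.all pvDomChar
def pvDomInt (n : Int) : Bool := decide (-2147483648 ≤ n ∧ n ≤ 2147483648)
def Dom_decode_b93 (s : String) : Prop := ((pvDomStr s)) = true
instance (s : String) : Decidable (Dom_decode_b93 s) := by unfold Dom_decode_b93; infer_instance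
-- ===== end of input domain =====

-- B replaces A's three 32-bit words with hand-rolled carries by one big integer
-- built with Horner's rule, emitting bits LSB-first and reversing (objective: simpler).
-- Python's `(x >> j) & 1` is ported by hand as `PySem.Int.mod (x >>> j) 2`:
-- exact for every int, since `& 1` is the parity bit also for negatives.

-- ===== PORT A =====
def char_to_digit (c : Char) : Int :=
  let d : Int := (c.toNat : Int) - 32
  let d := if d > 2 then d - 1 else d
  let d := if d > 59 then d - 1 else d
  d

-- `char_to_digit(s[i+j]) if i + j < len(s) else 0` (the guard makes the index in range)
def b93digit (cs : List Char) (n i j : Int) : Int :=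
  if i + j < n then char_to_digit (PySem.List.pyGet? cs (i + j) |>.getD ' ') else 0

-- the body of A's inner `for j in range(13)` loop, step for step
def b93step (d : Int) (st : Int × Int × Int) : Int × Int × Int :=
  let P : Int := 2 ^ 32
  let v := st.1 * 93 + d
  let l' := PySem.Int.mod v P
  let c := PySem.Int.floordiv (v - l') P
  let v2 := st.2.1 * 93 + c
  let m' := PySem.Int.mod v2 P
  let c2 := PySem.Int.floordiv (v2 - m') P
  (l', m', st.2.2 * 93 + c2)

def decode_b93 (s : String) : List Int :=
  let cs := s.toList
  let n : Int := (cs.length : Int)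
  (PySem.List.pyRange 0 n 13).foldl (fun bits i =>
    let st := (PySem.List.pyRange 0 13 1).foldl
      (fun st j => b93step (b93digit cs n i j) st) (0, 0, 0)
    (PySem.List.pyRange 84 (-1) (-1)).foldl (fun bits (j : Int) =>
      if j > 63 then bits ++ [PySem.Int.mod (st.2.2 >>> (j - 64).toNat) 2]
      else if j > 31 then bits ++ [PySem.Int.mod (st.2.1 >>> (j - 32).toNat) 2]
      else bits ++ [PySem.Int.mod (st.1 >>> j.toNat) 2]) bits) []

-- ===== PORT B =====
def decode_b93_alt (s : String) : List Int :=
  let cs := s.toList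
  let n : Int := (cs.length : Int)
  (PySem.List.pyRange 0 n 13).foldl (fun bits i =>
    let val := (PySem.List.pyRange 0 13 1).foldl
      (fun val j => val * 93 + b93digit cs n i j) 0
    let chunk := (PySem.List.pyRange 0 85 1).foldl
      (fun (p : List Int × Int) _ => (p.1 ++ [PySem.Int.mod p.2 2], p.2 >>> (1 : Nat))) ([], val)
    bits ++ chunk.1.reverse) []

-- ===== PRECONDITION & SPEC =====
def Spec_decode_b93 (s : String) (out : List Int) : Prop := out = decode_b93_alt s
instance (s : String) (out : List Int) : Decidable (Spec_decode_b93 s out) := by unfold Spec_decode_b93; infer_instance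

-- ===== CLAIM (what is proved, stated in full; the proofs are below) =====
def Claim_equal_decode_b93 : Prop := ∀ (s : String), Dom_decode_b93 s → Spec_decode_b93 s (decode_b93 s)

-- ===== LEMMAS AND PROOFS =====

-- A's inner loop keeps `h*2^64 + m*2^32 + l` equal to B's Horner accumulator.
theorem inner_inv (f : Int → Int) (js : List Int) (l m h val : Int)
    (hl0 : 0 ≤ l) (hl : l < 2 ^ 32) (hm0 : 0 ≤ m) (hm : m < 2 ^ 32)
    (hv : val = (h * 2 ^ 32 + m) * 2 ^ 32 + l) :
    0 ≤ (js.foldl (fun st j => b93step (f j) st) (l, m, h)).1 ∧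
    (js.foldl (fun st j => b93step (f j) st) (l, m, h)).1 < 2 ^ 32 ∧
    0 ≤ (js.foldl (fun st j => b93step (f j) st) (l, m, h)).2.1 ∧
    (js.foldl (fun st j => b93step (f j) st) (l, m, h)).2.1 < 2 ^ 32 ∧
    js.foldl (fun v j => v * 93 + f j) val =
      ((js.foldl (fun st j => b93step (f j) st) (l, m, h)).2.2 * 2 ^ 32 +
        (js.foldl (fun st j => b93step (f j) st) (l, m, h)).2.1) * 2 ^ 32 +
        (js.foldl (fun st j => b93step (f j) st) (l, m, h)).1 := by
  induction js generalizing l m h val with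
  | nil => exact ⟨hl0, hl, hm0, hm, hv⟩
  | cons j js ih =>
    simp only [List.foldl_cons]
    have hP : (0:Int) < 2 ^ 32 := by norm_num
    set d := f j with hd
    have hstep : b93step d (l, m, h) =
        ((l * 93 + d) % 2 ^ 32,
         (m * 93 + (l * 93 + d) / 2 ^ 32) % 2 ^ 32,
         h * 93 + (m * 93 + (l * 93 + d) / 2 ^ 32) / 2 ^ 32) := by
      show (PySem.Int.mod _ _, PySem.Int.mod _ _, _) = _
      rw [PySem.Int.mod_eq_emod_of_pos hP]
      have e1 : l * 93 + d - (l * 93 + d) % 2 ^ 32 = 2 ^ 32 * ((l * 93 + d) / 2 ^ 32) := by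
        have := Int.emod_add_ediv (l * 93 + d) (2 ^ 32); linarith
      rw [e1, PySem.Int.floordiv_eq_ediv_of_pos hP, Int.mul_ediv_cancel_left _ (by norm_num)]
      rw [PySem.Int.mod_eq_emod_of_pos hP]
      have e2 : m * 93 + (l * 93 + d) / 2 ^ 32 - (m * 93 + (l * 93 + d) / 2 ^ 32) % 2 ^ 32 =
          2 ^ 32 * ((m * 93 + (l * 93 + d) / 2 ^ 32) / 2 ^ 32) := by
        have := Int.emod_add_ediv (m * 93 + (l * 93 + d) / 2 ^ 32) (2 ^ 32); linarith
      rw [e2, PySem.Int.floordiv_eq_ediv_of_pos hP, Int.mul_ediv_cancel_left _ (by norm_num)]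
    rw [hstep]
    apply ih
    · exact Int.emod_nonneg _ (by norm_num)
    · exact Int.emod_lt_of_pos _ hP
    · exact Int.emod_nonneg _ (by norm_num)
    · exact Int.emod_lt_of_pos _ hP
    · -- algebra: val*93 + d = ((h'*P + m')*P + l') for the stepped words
      have q1 := Int.emod_add_ediv (l * 93 + d) (2 ^ 32)
      have q2 := Int.emod_add_ediv (m * 93 + (l * 93 + d) / 2 ^ 32) (2 ^ 32)
      nlinarith [q1, q2]

theorem key_mod (x y : Int) (t k : Nat) (ht : t < k) :
    ((x + 2 ^ k * y) / 2 ^ t) % 2 = (x / 2 ^ t) % 2 := by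
  have hk : k - t + t = k := by omega
  have e : (2:Int) ^ k * y = 2 ^ (k - t) * y * 2 ^ t := by
    rw [show (2:Int) ^ k = 2 ^ (k - t) * 2 ^ t by rw [← pow_add, hk]]; ring
  rw [e, Int.add_mul_ediv_right _ _ (by positivity : ((2:Int) ^ t) ≠ 0)]
  have e2 : (2:Int) ^ (k - t) * y = 2 ^ (k - t - 1) * y * 2 := by
    rw [show (2:Int) ^ (k - t) = 2 ^ (k - t - 1) * 2 by rw [← pow_succ]; congr 1; omega]; ring
  rw [e2]; omega

theorem drop_low (x y : Int) (k : Nat) (hx0 : 0 ≤ x) (hxlt : x < 2 ^ k) :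
    (x + 2 ^ k * y) / 2 ^ k = y := by
  rw [Int.add_mul_ediv_left _ _ (by positivity : ((2:Int) ^ k) ≠ 0),
    Int.ediv_eq_zero_of_lt hx0 hxlt, zero_add]

-- one emitted bit: A's word selection = bit t of the combined value
theorem bit_eq (l m h val : Int) (t : Nat) (hts : t ≤ 84)
    (hl0 : 0 ≤ l) (hl : l < 2 ^ 32) (hm0 : 0 ≤ m) (hm : m < 2 ^ 32)
    (hv : val = (h * 2 ^ 32 + m) * 2 ^ 32 + l) :
    (if (t : Int) > 63 then PySem.Int.mod (h >>> (((t : Int)) - 64).toNat) 2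
     else if (t : Int) > 31 then PySem.Int.mod (m >>> (((t : Int)) - 32).toNat) 2
     else PySem.Int.mod (l >>> ((t : Int)).toNat) 2) = PySem.Int.mod (val >>> t) 2 := by
  have h2 : (0:Int) < 2 := by norm_num
  simp only [PySem.Int.mod_eq_emod_of_pos h2, Int.shiftRight_eq_div_pow]
  push_cast
  by_cases h64 : (t : Int) > 63
  · rw [if_pos h64]
    have ht64 : ((t : Int) - 64).toNat = t - 64 := by omega
    have hsplit : (2:Int) ^ t = 2 ^ 64 * 2 ^ (t - 64) := by rw [← pow_add]; congr 1; omega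
    have hv' : val = (l + 2 ^ 32 * m) + 2 ^ 64 * h := by rw [hv]; ring
    have hlit : (2:Int) ^ 32 = 4294967296 := by norm_num
    have hlit64 : (2:Int) ^ 64 = 18446744073709551616 := by norm_num
    rw [ht64, hsplit, ← Int.ediv_ediv_of_nonneg (by positivity), hv',
      drop_low _ _ 64 (by omega) (by omega)]
  · rw [if_neg h64]
    by_cases h32 : (t : Int) > 31
    · rw [if_pos h32]
      have ht32 : ((t : Int) - 32).toNat = t - 32 := by omega
      have hsplit : (2:Int) ^ t = 2 ^ 32 * 2 ^ (t - 32) := by rw [← pow_add]; congr 1; omega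
      have hv' : val = l + 2 ^ 32 * (m + 2 ^ 32 * h) := by rw [hv]; ring
      rw [ht32, hsplit, ← Int.ediv_ediv_of_nonneg (by positivity), hv',
        drop_low _ _ 32 hl0 hl, key_mod m h (t - 32) 32 (by omega)]
    · rw [if_neg h32]
      have htn : ((t : Int)).toNat = t := by omega
      have hv' : val = l + 2 ^ 32 * (m + 2 ^ 32 * h) := by rw [hv]; ring
      rw [htn, hv', key_mod l (m + 2 ^ 32 * h) t 32 (by omega)]

-- B's 85-step shift loop builds exactly the bits of `val`, LSB first
theorem chunk_eq (val : Int) (k : Nat) (acc : List Int) :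
    ((PySem.List.pyRange 0 (k : Int) 1).foldl
      (fun (p : List Int × Int) _ => (p.1 ++ [PySem.Int.mod p.2 2], p.2 >>> (1 : Nat))) (acc, val)) =
    (acc ++ (List.range k).map (fun (t : Nat) => PySem.Int.mod (val >>> t) 2), val >>> k) := by
  induction k with
  | zero =>
    rw [Nat.cast_zero, PySem.List.pyRange_one_eq_nil (le_refl 0)]
    simp [Int.shiftRight_eq_div_pow]
  | succ n ih =>
    have hcast : ((n + 1 : Nat) : Int) = (n : Int) + 1 := by push_cast; ring
    have hs : (val >>> n) >>> (1 : Nat) = val >>> (n + 1) := by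
      simp only [Int.shiftRight_eq_div_pow]
      push_cast
      rw [Int.ediv_ediv_of_nonneg (by positivity), ← pow_succ]
    rw [hcast, PySem.List.pyRange_one_succ_right (by positivity), List.foldl_append, ih]
    simp [List.range_succ, hs]

-- reversing a map over `range n` re-indexes it back-to-front
theorem rev_map_range {α : Type} (n : Nat) (f : Nat → α) :
    ((List.range n).map f).reverse = (List.range n).map (fun k => f (n - 1 - k)) := by
  apply List.ext_getElem (by simp)
  intro k h1 h2
  simp [List.getElem_reverse]

-- per-chunk equality of the two bodies
theorem chunk_body_eq (cs : List Char) (n i : Int) (bits : List Int) :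
    (let st := (PySem.List.pyRange 0 13 1).foldl
        (fun st j => b93step (b93digit cs n i j) st) (0, 0, 0)
     (PySem.List.pyRange 84 (-1) (-1)).foldl (fun bits (j : Int) =>
        if j > 63 then bits ++ [PySem.Int.mod (st.2.2 >>> (j - 64).toNat) 2]
        else if j > 31 then bits ++ [PySem.Int.mod (st.2.1 >>> (j - 32).toNat) 2]
        else bits ++ [PySem.Int.mod (st.1 >>> j.toNat) 2]) bits) =
    (let val := (PySem.List.pyRange 0 13 1).foldl
        (fun val j => val * 93 + b93digit cs n i j) 0
     let chunk := (PySem.List.pyRange 0 85 1).foldl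
        (fun (p : List Int × Int) _ => (p.1 ++ [PySem.Int.mod p.2 2], p.2 >>> (1 : Nat))) ([], val)
     bits ++ chunk.1.reverse) := by
  dsimp only
  have inv := inner_inv (b93digit cs n i) (PySem.List.pyRange 0 13 1) 0 0 0 0 le_rfl
    (by norm_num) le_rfl (by norm_num) (by ring)
  set st := (PySem.List.pyRange 0 13 1).foldl
    (fun st j => b93step (b93digit cs n i j) st) ((0:Int), (0:Int), (0:Int)) with hst
  set val := (PySem.List.pyRange 0 13 1).foldl
    (fun v j => v * 93 + b93digit cs n i j) (0:Int) with hval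
  obtain ⟨h1, h2, h3, h4, h5⟩ := inv
  have hbody : (fun (bits : List Int) (j : Int) =>
      if j > 63 then bits ++ [PySem.Int.mod (st.2.2 >>> (j - 64).toNat) 2]
      else if j > 31 then bits ++ [PySem.Int.mod (st.2.1 >>> (j - 32).toNat) 2]
      else bits ++ [PySem.Int.mod (st.1 >>> j.toNat) 2]) =
      fun (bits : List Int) (j : Int) => bits ++ [if j > 63 then PySem.Int.mod (st.2.2 >>> (j - 64).toNat) 2
        else if j > 31 then PySem.Int.mod (st.2.1 >>> (j - 32).toNat) 2
        else PySem.Int.mod (st.1 >>> j.toNat) 2] := by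
    funext bits j; split_ifs <;> rfl
  rw [hbody, PySem.List.foldl_append_singleton_eq_map]
  rw [show (85:Int) = ((85:Nat):Int) by norm_num, chunk_eq val 85 [], List.nil_append]
  rw [rev_map_range, PySem.List.pyRange_neg_one, List.map_map]
  norm_num
  apply List.map_congr_left
  intro k hk
  rw [List.mem_range] at hk
  dsimp only [Function.comp]
  have hcast : (84 : Int) - (k : Int) = (((84 - k : Nat)) : Int) := by omega
  simp only [hcast]
  have hb := bit_eq st.1 st.2.1 st.2.2 val (84 - k) (by omega) h1 h2 h3 h4 h5
  simp only [PySem.Int.mod_eq_emod_of_pos (by norm_num : (0:Int) < 2)] at hb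
  exact hb

-- ===== VERDICT (by name: the statement is the Claim_ definition above) =====
set_option maxRecDepth 4000 in
set_option maxHeartbeats 1000000 in
theorem decode_b93_spec : Claim_equal_decode_b93 := by
  intro s _
  unfold Spec_decode_b93 decode_b93 decode_b93_alt
  dsimp only
  rw [show (fun (bits : List Int) (i : Int) =>
      let st := (PySem.List.pyRange 0 13 1).foldl
        (fun st j => b93step (b93digit s.toList ((s.toList.length : Nat) : Int) i j) st) (0, 0, 0)
      (PySem.List.pyRange 84 (-1) (-1)).foldl (fun bits (j : Int) =>
        if j > 63 then bits ++ [PySem.Int.mod (st.2.2 >>> (j - 64).toNat) 2]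
        else if j > 31 then bits ++ [PySem.Int.mod (st.2.1 >>> (j - 32).toNat) 2]
        else bits ++ [PySem.Int.mod (st.1 >>> j.toNat) 2]) bits) =
      (fun (bits : List Int) (i : Int) =>
      let val := (PySem.List.pyRange 0 13 1).foldl
        (fun val j => val * 93 + b93digit s.toList ((s.toList.length : Nat) : Int) i j) 0
      let chunk := (PySem.List.pyRange 0 85 1).foldl
        (fun (p : List Int × Int) _ => (p.1 ++ [PySem.Int.mod p.2 2], p.2 >>> (1 : Nat))) ([], val)
      bits ++ chunk.1.reverse) from
    funext fun bits => funext fun i =>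
      chunk_body_eq s.toList ((s.toList.length : Nat) : Int) i bits]
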